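-- pv_equiv track=rewrite | github.com/CERNDocumentServer/cds-rdm | site/cds_rdm/inspire_harvester/transform/resource_types.py | _check_if_published_art
-- ===== SOURCE A (Python) =====
-- def _check_if_published_art(src_metadata):
--     """Check if record is published article.
--
--     follows https://github.com/inspirehep/inspire-schemas/blob/369a2f78189d9711cda8ac83e4e7d9344cc888da/inspire_schemas/readers/literature.py#L338
--     """
--
--     def is_citeable(publication_info):
--         """Check fields to define if the article is citeable."""
--
--         def _item_has_pub_info(item):
--             return all(key in item for key in ("journal_title", "journal_volume"))
--
--         def _item_has_page_or_artid(item):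
--             return any(key in item for key in ("page_start", "artid"))
--
--         has_pub_info = any(_item_has_pub_info(item) for item in publication_info)
--         has_page_or_artid = any(
--             _item_has_page_or_artid(item) for item in publication_info
--         )
--
--         return has_pub_info and has_page_or_artid
--
--     pub_info = src_metadata.get("publication_info", [])
--
--     citeable = pub_info and is_citeable(pub_info)
--
--     submitted = "dois" in src_metadata and any(
--         "journal_title" in el for el in pub_info
--     )
--
--     return citeable or submitted
-- ===== SOURCE B (Python) =====
-- def _check_if_published_art(src_metadata):
--     """Check if record is a published/citeable article.
--
--     Recursive short-circuit scan: each item's keys become a set, set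
--     operations test the three conditions, and the recursion returns True
--     as soon as the verdict is determined instead of scanning to the end.
--     """
--     has_dois = "dois" in src_metadata
--
--     def scan(items, hp, ha):
--         if not items:
--             return False
--         keys = set(items[0])
--         hp = hp or {"journal_title", "journal_volume"} <= keys
--         ha = ha or not keys.isdisjoint({"page_start", "artid"})
--         if (hp and ha) or (has_dois and "journal_title" in keys):
--             return True
--         return scan(items[1:], hp, ha)
--
--     return scan(src_metadata.get("publication_info", []), False, False)
-- ===== Notes on version B (the rewrite author's own statement) =====
-- stated objective: alternative
-- what changed: Replaces A's nested closures and three independent whole-list any() scans with a recursive short-circuit scan that turns each item into a set of keys, tests the conditions with set operations (subset, disjointness), and returns True as soon as the verdict is determined.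
import Mathlib
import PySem

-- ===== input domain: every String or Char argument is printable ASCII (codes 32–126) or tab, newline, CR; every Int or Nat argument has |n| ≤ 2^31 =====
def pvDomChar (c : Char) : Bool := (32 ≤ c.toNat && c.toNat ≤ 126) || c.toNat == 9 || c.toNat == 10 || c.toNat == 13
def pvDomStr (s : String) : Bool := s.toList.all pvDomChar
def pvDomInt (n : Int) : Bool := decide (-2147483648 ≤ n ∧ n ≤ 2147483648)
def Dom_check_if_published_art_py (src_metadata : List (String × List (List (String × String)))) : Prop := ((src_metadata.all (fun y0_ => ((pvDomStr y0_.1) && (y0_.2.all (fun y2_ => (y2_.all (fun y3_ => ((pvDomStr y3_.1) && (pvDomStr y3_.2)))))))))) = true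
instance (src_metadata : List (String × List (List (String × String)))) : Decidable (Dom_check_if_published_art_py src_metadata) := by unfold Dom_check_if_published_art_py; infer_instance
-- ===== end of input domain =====

-- B replaces A's three whole-list any() scans and nested closures with a recursive
-- short-circuit scan over publication_info using key-set operations (objective: simpler).

-- ===== PORT A =====
-- dict membership 'k in d' on an association list: some pair has key k
def pvKeyMem (d : List (String × String)) (k : String) : Bool := d.any (fun p => p.1 == k)

def pvGetPubInfo (src_metadata : List (String × List (List (String × String)))) : List (List (String × String)) :=
  ((src_metadata.find? (fun p => p.1 == "publication_info")).map Prod.snd).getD []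

-- A: helper closures transliterated, then 'citeable or submitted'
def pvItemHasPubInfo (item : List (String × String)) : Bool :=
  (["journal_title", "journal_volume"]).all (fun k => pvKeyMem item k)

def pvItemHasPageOrArtid (item : List (String × String)) : Bool :=
  (["page_start", "artid"]).any (fun k => pvKeyMem item k)

def pvIsCiteable (publication_info : List (List (String × String))) : Bool :=
  let has_pub_info := publication_info.any (fun item => pvItemHasPubInfo item)
  let has_page_or_artid := publication_info.any (fun item => pvItemHasPageOrArtid item)
  has_pub_info && has_page_or_artid

def check_if_published_art_py (src_metadata : List (String × List (List (String × String)))) : Bool :=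
  let pub_info := pvGetPubInfo src_metadata
  let citeable := (!pub_info.isEmpty) && pvIsCiteable pub_info
  let submitted := (src_metadata.any (fun p => p.1 == "dois")) &&
    pub_info.any (fun el => pvKeyMem el "journal_title")
  citeable || submitted

-- ===== PORT B =====
-- B's recursive helper 'scan': consumes items one by one, builds set(item) of keys,
-- updates its two flags with set operations and RETURNS EARLY once the verdict is fixed.
def pvScanB (has_dois : Bool) : List (List (String × String)) → Bool → Bool → Bool
  | [], _, _ => false
  | item :: rest, hp0, ha0 =>
    let keys : PySem.Set String := PySem.Set.ofList (item.map Prod.fst)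
    let hp := hp0 || PySem.Set.issubset (PySem.Set.ofList ["journal_title", "journal_volume"]) keys
    let ha := ha0 || !(PySem.Set.isdisjoint keys (PySem.Set.ofList ["page_start", "artid"]))
    if (hp && ha) || (has_dois && PySem.Set.contains keys "journal_title") then true
    else pvScanB has_dois rest hp ha

def check_if_published_art_py_alt (src_metadata : List (String × List (List (String × String)))) : Bool :=
  let has_dois := src_metadata.any (fun p => p.1 == "dois")
  pvScanB has_dois (pvGetPubInfo src_metadata) false false

-- ===== PRECONDITION & SPEC =====
def Spec_check_if_published_art_py (src_metadata : List (String × List (List (String × String)))) (out : Bool) : Prop := out = check_if_published_art_py_alt src_metadata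
instance (src_metadata : List (String × List (List (String × String)))) (out : Bool) : Decidable (Spec_check_if_published_art_py src_metadata out) := by unfold Spec_check_if_published_art_py; infer_instance

-- ===== CLAIM (what is proved, stated in full; the proofs are below) =====
def Claim_equal_check_if_published_art_py : Prop := ∀ (src_metadata : List (String × List (List (String × String)))), Dom_check_if_published_art_py src_metadata → Spec_check_if_published_art_py src_metadata (check_if_published_art_py src_metadata)

-- ===== LEMMAS AND PROOFS =====
-- membership in the key set built by B equals A's dict-membership test
theorem pv_contains_keys (item : List (String × String)) (k : String) :
    PySem.Set.contains (PySem.Set.ofList (item.map Prod.fst)) k = pvKeyMem item k := by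
  simp [pvKeyMem, PySem.Set.contains, List.any_eq]

-- literal Python set constants reduce to their element lists
theorem pv_lit_jt_jv : PySem.Set.ofList ["journal_title", "journal_volume"] = ["journal_title", "journal_volume"] := by decide
theorem pv_lit_ps_ai : PySem.Set.ofList ["page_start", "artid"] = ["page_start", "artid"] := by decide

-- B's subset test equals A's _item_has_pub_info
theorem pv_subset_eq (item : List (String × String)) :
    PySem.Set.issubset (PySem.Set.ofList ["journal_title", "journal_volume"])
        (PySem.Set.ofList (item.map Prod.fst)) = pvItemHasPubInfo item := by
  simp only [PySem.Set.issubset, pv_lit_jt_jv, List.all_cons, List.all_nil, Bool.and_true,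
    pvItemHasPubInfo, List.all_nil]
  rw [show ∀ s : PySem.Set String, ∀ k, s.contains k = PySem.Set.contains s k from fun _ _ => rfl]
  rw [pv_contains_keys, show (PySem.Set.ofList (item.map Prod.fst)).contains "journal_volume" = PySem.Set.contains (PySem.Set.ofList (item.map Prod.fst)) "journal_volume" from rfl, pv_contains_keys]

-- B's disjointness test equals A's _item_has_page_or_artid
theorem pv_disjoint_eq (item : List (String × String)) :
    (!(PySem.Set.isdisjoint (PySem.Set.ofList (item.map Prod.fst))
        (PySem.Set.ofList ["page_start", "artid"]))) = pvItemHasPageOrArtid item := by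
  simp [pvItemHasPageOrArtid, pvKeyMem, PySem.Set.isdisjoint, pv_lit_ps_ai, List.any_eq]
  aesop

-- the short-circuit scan, started with not-yet-decided flags, computes A's combination
theorem pv_scan_eq (dois : Bool) (items : List (List (String × String))) :
    ∀ hp ha : Bool, ¬(hp = true ∧ ha = true) →
    pvScanB dois items hp ha =
      (((hp || items.any (fun item => pvItemHasPubInfo item)) &&
        (ha || items.any (fun item => pvItemHasPageOrArtid item))) ||
       (dois && items.any (fun el => pvKeyMem el "journal_title"))) := by
  induction items with
  | nil => intro hp ha h; cases hp <;> cases ha <;> simp_all [pvScanB]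
  | cons x tl ih =>
      intro hp ha h
      simp only [pvScanB, pv_contains_keys, pv_subset_eq, pv_disjoint_eq, List.any_cons]
      split
      · rename_i hc
        cases hp <;> cases ha <;> cases dois <;>
          cases hP : pvItemHasPubInfo x <;> cases hA : pvItemHasPageOrArtid x <;>
          cases hJ : pvKeyMem x "journal_title" <;> simp_all
      · rename_i hc
        rw [ih]
        · cases hp <;> cases ha <;> cases dois <;>
            cases hP : pvItemHasPubInfo x <;> cases hA : pvItemHasPageOrArtid x <;>
            cases hJ : pvKeyMem x "journal_title" <;> simp_all
        · intro hcon
          apply hc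
          simp_all

-- ===== VERDICT (by name: the statement is the Claim_ definition above) =====
theorem check_if_published_art_py_spec : Claim_equal_check_if_published_art_py := by
  intro src _
  unfold Spec_check_if_published_art_py check_if_published_art_py check_if_published_art_py_alt
  rw [pv_scan_eq _ _ false false (by simp)]
  cases h : pvGetPubInfo src with
  | nil => simp [pvIsCiteable]
  | cons x xs => simp [pvIsCiteable]
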